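-- pv_equiv track=rewrite | github.com/CERN-IT-INNOVATION/Quantum-Phase-Detection-ANNNI | phase-estimation/qcnn_functions.py | num_params_qcnn
-- ===== SOURCE A (Python) =====
-- def num_params_qcnn(N):
--     '''
--     N = number of wires (spins)
--     To evaluate the number of parameters needed for the qcnn
--     a recursive function is needed:
--     '''
--     n_params = 0
--     # While the number of wires is more than 1s
--     while(N > 1):
--         # Convolution
--         n_params += 3*N
--         # Pooling
--         n_params += 2*(N//2) + N%2
--         # Reduce number of wires due to pooling
--         N = N // 2 + N % 2
--
--     # Last RY gate
--     n_params += 1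
--
--     return n_params
-- ===== SOURCE B (Python) =====
-- def num_params_qcnn(N):
--     # Recursive decomposition: per level 3*N conv + 2*(N//2)+N%2 pooling, recurse on ceil(N/2).
--     if N <= 1:
--         return 1
--     return 3*N + 2*(N//2) + N % 2 + num_params_qcnn(N // 2 + N % 2)
-- ===== Notes on version B (the rewrite author's own statement) =====
-- stated objective: alternative
-- what changed: Replaced the while loop with a mutable accumulator by a direct recursion on the ceiling-halved wire count, returning the per-level parameter count plus the recursive total.
import Mathlib
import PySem

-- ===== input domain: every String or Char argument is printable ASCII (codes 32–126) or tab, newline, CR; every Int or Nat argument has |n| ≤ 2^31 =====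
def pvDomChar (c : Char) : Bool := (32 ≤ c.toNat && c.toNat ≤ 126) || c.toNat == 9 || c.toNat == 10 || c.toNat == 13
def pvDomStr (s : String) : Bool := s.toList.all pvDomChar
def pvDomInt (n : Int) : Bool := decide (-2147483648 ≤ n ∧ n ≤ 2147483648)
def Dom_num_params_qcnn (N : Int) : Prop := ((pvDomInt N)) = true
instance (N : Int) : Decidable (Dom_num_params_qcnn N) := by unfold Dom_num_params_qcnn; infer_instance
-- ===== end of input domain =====

-- B replaces A's while loop by direct recursion on the ceiling-halved wire count; exact same values.
-- ===== PORT A =====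
-- while(N>1): n_params += 3*N; n_params += 2*(N//2)+N%2; N = N//2+N%2 ; then n_params += 1
def qcnnLoopA (N n_params : Int) : Int :=
  if h : N > 1 then
    qcnnLoopA (PySem.Int.floordiv N 2 + PySem.Int.mod N 2)
      (n_params + 3 * N + (2 * PySem.Int.floordiv N 2 + PySem.Int.mod N 2))
  else
    n_params + 1
termination_by N.toNat
decreasing_by
  have h2 : PySem.Int.floordiv N 2 = N / 2 := PySem.Int.floordiv_eq_ediv_of_pos (by omega)
  have h3 : PySem.Int.mod N 2 = N % 2 := PySem.Int.mod_eq_emod_of_pos (by omega)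
  rw [h2, h3]; omega

def num_params_qcnn (N : Int) : Int := qcnnLoopA N 0

-- ===== PORT B =====
def num_params_qcnn_alt (N : Int) : Int :=
  if h : N ≤ 1 then 1
  else
    3 * N + 2 * PySem.Int.floordiv N 2 + PySem.Int.mod N 2 +
      num_params_qcnn_alt (PySem.Int.floordiv N 2 + PySem.Int.mod N 2)
termination_by N.toNat
decreasing_by
  have h2 : PySem.Int.floordiv N 2 = N / 2 := PySem.Int.floordiv_eq_ediv_of_pos (by omega)
  have h3 : PySem.Int.mod N 2 = N % 2 := PySem.Int.mod_eq_emod_of_pos (by omega)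
  rw [h2, h3]; omega

-- ===== PRECONDITION & SPEC =====
def Spec_num_params_qcnn (N : Int) (out : Int) : Prop := out = num_params_qcnn_alt N
instance (N : Int) (out : Int) : Decidable (Spec_num_params_qcnn N out) := by unfold Spec_num_params_qcnn; infer_instance

-- ===== CLAIM (what is proved, stated in full; the proofs are below) =====
def Claim_equal_num_params_qcnn : Prop := ∀ (N : Int), Dom_num_params_qcnn N → Spec_num_params_qcnn N (num_params_qcnn N)

-- ===== LEMMAS AND PROOFS =====

-- ===== VERDICT (by name: the statement is the Claim_ definition above) =====
theorem qcnnLoopA_eq (N acc : Int) : qcnnLoopA N acc = acc + num_params_qcnn_alt N := by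
  induction N, acc using qcnnLoopA.induct with
  | case1 N acc h ih =>
      rw [qcnnLoopA, num_params_qcnn_alt]
      simp only [h, dif_pos, dif_neg (by omega : ¬ N ≤ 1)]
      rw [ih]
      ring
  | case2 N acc h =>
      rw [qcnnLoopA, num_params_qcnn_alt]
      rw [dif_neg h, dif_pos (by omega : N ≤ 1)]

theorem num_params_qcnn_spec : Claim_equal_num_params_qcnn := by
  intro N _
  unfold Spec_num_params_qcnn num_params_qcnn
  rw [qcnnLoopA_eq]
  ring
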